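-- pv_equiv track=rewrite | github.com/deepaksshettigar/ut-jira-helper | backend/app/services/jql_service.py | get_query_suggestions
-- ===== SOURCE A (Python) =====
-- from typing import List, Optional, Tuple
--
-- def get_query_suggestions(current_query: str) -> List[str]:
--     """Generate suggestions for follow-up queries"""
--     suggestions = []
--     query_lower = current_query.lower()
--
--     # Suggest status refinements
--     if 'status' not in query_lower:
--         suggestions.extend([
--             "Add status filter (e.g., 'in progress only')",
--             "Show only completed tasks",
--             "Include pending items"
--         ])
--
--     # Suggest assignee refinements
--     if 'assigned' not in query_lower and 'by' not in query_lower: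
--         suggestions.extend([
--             "Filter by assignee",
--             "Show unassigned items",
--             "Group by team member"
--         ])
--
--     # Suggest time refinements
--     if not any(time_word in query_lower for time_word in ['today', 'week', 'month', 'day']):
--         suggestions.extend([
--             "Add time filter (e.g., 'this week')",
--             "Show recent items only",
--             "Include last month's items"
--         ])
--
--     # Suggest priority refinements
--     if 'priority' not in query_lower and not any(p in query_lower for p in ['high', 'low', 'urgent', 'critical']):
--         suggestions.extend([
--             "Filter by priority",
--             "Show high priority items",
--             "Include urgent tasks only"
--         ])
--
--     return suggestions[:5]  # Limit to 5 suggestions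
-- ===== SOURCE B (Python) =====
-- from typing import List
--
-- # keyword -> topic index; topics: 0 status, 1 assignee, 2 time, 3 priority
-- _KEYWORDS = [
--     ('status', 0),
--     ('assigned', 1), ('by', 1),
--     ('today', 2), ('week', 2), ('month', 2), ('day', 2),
--     ('priority', 3), ('high', 3), ('low', 3), ('urgent', 3), ('critical', 3),
-- ]
--
-- _BLOCKS = [
--     ["Add status filter (e.g., 'in progress only')",
--      "Show only completed tasks",
--      "Include pending items"],
--     ["Filter by assignee",
--      "Show unassigned items",
--      "Group by team member"],
--     ["Add time filter (e.g., 'this week')",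
--      "Show recent items only",
--      "Include last month's items"],
--     ["Filter by priority",
--      "Show high priority items",
--      "Include urgent tasks only"],
-- ]
--
-- def get_query_suggestions(current_query: str) -> List[str]:
--     """Generate suggestions for follow-up queries.
--
--     Single left-to-right scan of the query: at each position, mark the topic of
--     any keyword that starts there; then emit the suggestion blocks of the
--     topics that were never marked, truncated to 5.
--     """
--     q = current_query.lower()
--     covered = set()
--     for i in range(len(q)):
--         for kw, topic in _KEYWORDS:
--             if topic not in covered and q.startswith(kw, i):
--                 covered.add(topic)
--     out = []
--     for topic, block in enumerate(_BLOCKS):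
--         if topic not in covered:
--             out.extend(block)
--     return out[:5]
-- ===== Notes on version B (the rewrite author's own statement) =====
-- stated objective: alternative
-- what changed: Instead of per-category substring membership tests, B makes one position-driven scan of the query marking the topic of any keyword that starts at each position into a covered-topics set, then emits the blocks of uncovered topics and truncates to 5.
import Mathlib
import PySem

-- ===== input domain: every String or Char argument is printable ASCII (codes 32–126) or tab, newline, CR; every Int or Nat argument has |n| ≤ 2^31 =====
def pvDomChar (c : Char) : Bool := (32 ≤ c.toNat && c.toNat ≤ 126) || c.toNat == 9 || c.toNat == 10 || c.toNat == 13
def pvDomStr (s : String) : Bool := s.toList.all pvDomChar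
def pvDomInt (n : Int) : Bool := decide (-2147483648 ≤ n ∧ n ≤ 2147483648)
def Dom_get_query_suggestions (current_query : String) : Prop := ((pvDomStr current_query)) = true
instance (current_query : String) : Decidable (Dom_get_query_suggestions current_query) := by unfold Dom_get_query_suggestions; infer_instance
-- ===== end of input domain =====

-- B replaces A's per-category substring membership tests by one position-driven scan of the
-- query that marks covered topics into a set, then emits blocks of uncovered topics (objective: alternative).

-- ===== PORT A =====
def get_query_suggestions (current_query : String) : List String :=
  let query_lower := PySem.Str.lower current_query
  let suggestions : List String := []
  let suggestions :=
    if !(PySem.Str.isIn "status" query_lower) then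
      suggestions ++ ["Add status filter (e.g., 'in progress only')",
                      "Show only completed tasks",
                      "Include pending items"]
    else suggestions
  let suggestions :=
    if !(PySem.Str.isIn "assigned" query_lower) && !(PySem.Str.isIn "by" query_lower) then
      suggestions ++ ["Filter by assignee",
                      "Show unassigned items",
                      "Group by team member"]
    else suggestions
  let suggestions :=
    if !((["today", "week", "month", "day"] : List String).any
          (fun time_word => PySem.Str.isIn time_word query_lower)) then
      suggestions ++ ["Add time filter (e.g., 'this week')",
                      "Show recent items only",
                      "Include last month's items"]
    else suggestions
  let suggestions :=
    if !(PySem.Str.isIn "priority" query_lower) &&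
       !((["high", "low", "urgent", "critical"] : List String).any
          (fun p => PySem.Str.isIn p query_lower)) then
      suggestions ++ ["Filter by priority",
                      "Show high priority items",
                      "Include urgent tasks only"]
    else suggestions
  PySem.List.slice suggestions none (some 5)

-- ===== PORT B =====
def pvKeywords : List (String × Int) :=
  [("status", 0),
   ("assigned", 1), ("by", 1),
   ("today", 2), ("week", 2), ("month", 2), ("day", 2),
   ("priority", 3), ("high", 3), ("low", 3), ("urgent", 3), ("critical", 3)]

def pvBlocks : List (List String) :=
  [["Add status filter (e.g., 'in progress only')",
    "Show only completed tasks",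
    "Include pending items"],
   ["Filter by assignee",
    "Show unassigned items",
    "Group by team member"],
   ["Add time filter (e.g., 'this week')",
    "Show recent items only",
    "Include last month's items"],
   ["Filter by priority",
    "Show high priority items",
    "Include urgent tasks only"]]

-- q.startswith(kw, i) with 0 ≤ i is exactly Chars.startswith on (q.toList.drop i): exact on 0 ≤ i < len q.
def get_query_suggestions_alt (current_query : String) : List String :=
  let q := PySem.Str.lower current_query
  let covered : PySem.Set Int :=
    (PySem.List.pyRange 0 (PySem.Str.len q) 1).foldl
      (fun covered i =>
        pvKeywords.foldl
          (fun covered kv =>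
            if !(PySem.Set.contains covered kv.2) &&
               PySem.Chars.startswith (q.toList.drop i.toNat) kv.1.toList then
              PySem.Set.add covered kv.2
            else covered)
          covered)
      PySem.Set.empty
  let out :=
    (PySem.List.enumerate pvBlocks 0).foldl
      (fun out tb => if !(PySem.Set.contains covered tb.1) then out ++ tb.2 else out)
      []
  PySem.List.slice out none (some 5)

-- ===== PRECONDITION & SPEC =====
def Spec_get_query_suggestions (current_query : String) (out : List String) : Prop := out = get_query_suggestions_alt current_query
instance (current_query : String) (out : List String) : Decidable (Spec_get_query_suggestions current_query out) := by unfold Spec_get_query_suggestions; infer_instance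

-- ===== CLAIM (what is proved, stated in full; the proofs are below) =====
def Claim_equal_get_query_suggestions : Prop := ∀ (current_query : String), Dom_get_query_suggestions current_query → Spec_get_query_suggestions current_query (get_query_suggestions current_query)

-- ===== LEMMAS AND PROOFS =====

-- inner fold membership
lemma memInner (ks : List (String × Int)) (s : List Char) (S : PySem.Set Int) (t : Int) :
    t ∈ ks.foldl (fun c kv =>
        if !(PySem.Set.contains c kv.2) && PySem.Chars.startswith s kv.1.toList then
          PySem.Set.add c kv.2 else c) S
      ↔ t ∈ S ∨ ∃ kv ∈ ks, kv.2 = t ∧ PySem.Chars.startswith s kv.1.toList = true := by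
  induction ks generalizing S with
  | nil => simp
  | cons kv ks ih =>
    simp only [List.foldl_cons, ih, List.mem_cons]
    have hcon := PySem.Set.contains_iff S kv.2
    by_cases hm : kv.2 ∈ S
    · have hc : S.contains kv.2 = true := hcon.2 hm
      rw [if_neg (by simp [hm])]
      constructor
      · rintro (h | ⟨kv', h1, h2, h3⟩)
        · exact Or.inl h
        · exact Or.inr ⟨kv', Or.inr h1, h2, h3⟩
      · rintro (h | ⟨kv', h1 | h1, h2, h3⟩)
        · exact Or.inl h
        · subst h1; exact Or.inl (h2 ▸ hm)
        · exact Or.inr ⟨kv', h1, h2, h3⟩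
    · have hc : S.contains kv.2 = false := Bool.eq_false_iff.2 (fun h => hm (hcon.1 h))
      by_cases hs : PySem.Chars.startswith s kv.1.toList = true
      · rw [if_pos (by simp [hm, hs])]
        simp only [PySem.Set.mem_add]
        constructor
        · rintro ((h | h) | ⟨kv', h1, h2, h3⟩)
          · exact Or.inl h
          · exact Or.inr ⟨kv, Or.inl rfl, h.symm, hs⟩
          · exact Or.inr ⟨kv', Or.inr h1, h2, h3⟩
        · rintro (h | ⟨kv', h1 | h1, h2, h3⟩)
          · exact Or.inl (Or.inl h)
          · subst h1; exact Or.inl (Or.inr h2.symm)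
          · exact Or.inr ⟨kv', h1, h2, h3⟩
      · have hs' : PySem.Chars.startswith s kv.1.toList = false := Bool.eq_false_iff.2 hs
        rw [if_neg (by simp [hs'])]
        constructor
        · rintro (h | ⟨kv', h1, h2, h3⟩)
          · exact Or.inl h
          · exact Or.inr ⟨kv', Or.inr h1, h2, h3⟩
        · rintro (h | ⟨kv', h1 | h1, h2, h3⟩)
          · exact Or.inl h
          · subst h1; exact absurd h3 hs
          · exact Or.inr ⟨kv', h1, h2, h3⟩

-- outer fold membership over an arbitrary list of positions
lemma memScan (l : List Char) (is : List Int) (S : PySem.Set Int) (t : Int) :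
    t ∈ is.foldl (fun covered i =>
        pvKeywords.foldl (fun c kv =>
          if !(PySem.Set.contains c kv.2) &&
             PySem.Chars.startswith (l.drop i.toNat) kv.1.toList then
            PySem.Set.add c kv.2 else c) covered) S
      ↔ t ∈ S ∨ ∃ i ∈ is, ∃ kv ∈ pvKeywords, kv.2 = t ∧
          PySem.Chars.startswith (l.drop i.toNat) kv.1.toList = true := by
  induction is generalizing S with
  | nil => simp
  | cons i is ih =>
    simp only [List.foldl_cons, ih, memInner, List.mem_cons]
    constructor
    · rintro ((h | ⟨kv, h1, h2, h3⟩) | ⟨i', h1, kv, h2, h3, h4⟩)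
      · exact Or.inl h
      · exact Or.inr ⟨i, Or.inl rfl, kv, h1, h2, h3⟩
      · exact Or.inr ⟨i', Or.inr h1, kv, h2, h3, h4⟩
    · rintro (h | ⟨i', h1 | h1, kv, h2, h3, h4⟩)
      · exact Or.inl (Or.inl h)
      · subst h1; exact Or.inl (Or.inr ⟨kv, h2, h3, h4⟩)
      · exact Or.inr ⟨i', h1, kv, h2, h3, h4⟩

-- the covered set of the scan contains t iff some keyword of topic t occurs in l
lemma mem_scan_iff (l : List Char) (t : Int) :
    t ∈ (PySem.List.pyRange 0 (l.length) 1).foldl (fun covered i =>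
        pvKeywords.foldl (fun c kv =>
          if !(PySem.Set.contains c kv.2) &&
             PySem.Chars.startswith (l.drop i.toNat) kv.1.toList then
            PySem.Set.add c kv.2 else c) covered) PySem.Set.empty
      ↔ ∃ kv ∈ pvKeywords, kv.2 = t ∧ PySem.Chars.isIn kv.1.toList l = true := by
  rw [memScan]
  simp only [PySem.Set.empty, List.not_mem_nil, false_or]
  constructor
  · rintro ⟨i, hi, kv, h1, h2, h3⟩
    refine ⟨kv, h1, h2, ?_⟩
    exact (PySem.Chars.exists_prefix_drop_iff_isIn _ _).1
      ⟨i.toNat, (PySem.Chars.startswith_iff _ _).1 h3⟩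
  · rintro ⟨kv, h1, h2, h3⟩
    obtain ⟨j, hj⟩ := (PySem.Chars.exists_prefix_drop_iff_isIn kv.1.toList l).2 h3
    have hne : kv.1.toList ≠ [] := by
      fin_cases h1 <;> simp
    have hjlt : j < l.length := by
      by_contra hge
      rw [List.drop_eq_nil_of_le (by omega)] at hj
      exact hne (List.prefix_nil.mp hj)
    refine ⟨(j : Int), ?_, kv, h1, h2, ?_⟩
    · rw [PySem.List.mem_pyRange_one]
      constructor <;> [positivity; exact_mod_cast hjlt]
    · rw [Int.toNat_natCast]
      exact (PySem.Chars.startswith_iff _ _).2 hj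

def pvScanSet (l : List Char) : PySem.Set Int :=
  (PySem.List.pyRange 0 (l.length) 1).foldl (fun covered i =>
      pvKeywords.foldl (fun c kv =>
        if !(PySem.Set.contains c kv.2) &&
           PySem.Chars.startswith (l.drop i.toNat) kv.1.toList then
          PySem.Set.add c kv.2 else c) covered) PySem.Set.empty

lemma pvScanSet_def (l : List Char) : pvScanSet l =
  (PySem.List.pyRange 0 (l.length) 1).foldl (fun covered i =>
      pvKeywords.foldl (fun c kv =>
        if !(PySem.Set.contains c kv.2) &&
           PySem.Chars.startswith (l.drop i.toNat) kv.1.toList then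
          PySem.Set.add c kv.2 else c) covered) PySem.Set.empty := rfl

lemma cov0 (l : List Char) :
    PySem.Set.contains (pvScanSet l) 0 = PySem.Chars.isIn "status".toList l := by
  rw [Bool.eq_iff_iff, PySem.Set.contains_iff, pvScanSet_def, mem_scan_iff]
  simp [pvKeywords]

lemma cov1 (l : List Char) :
    PySem.Set.contains (pvScanSet l) 1 =
      (PySem.Chars.isIn "assigned".toList l || PySem.Chars.isIn "by".toList l) := by
  rw [Bool.eq_iff_iff, PySem.Set.contains_iff, pvScanSet_def, mem_scan_iff]
  simp [pvKeywords]

lemma cov2 (l : List Char) :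
    PySem.Set.contains (pvScanSet l) 2 =
      (PySem.Chars.isIn "today".toList l || PySem.Chars.isIn "week".toList l ||
       PySem.Chars.isIn "month".toList l || PySem.Chars.isIn "day".toList l) := by
  rw [Bool.eq_iff_iff, PySem.Set.contains_iff, pvScanSet_def, mem_scan_iff]
  simp [pvKeywords]
  tauto

lemma cov3 (l : List Char) :
    PySem.Set.contains (pvScanSet l) 3 =
      (PySem.Chars.isIn "priority".toList l || PySem.Chars.isIn "high".toList l ||
       PySem.Chars.isIn "low".toList l || PySem.Chars.isIn "urgent".toList l ||
       PySem.Chars.isIn "critical".toList l) := by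
  rw [Bool.eq_iff_iff, PySem.Set.contains_iff, pvScanSet_def, mem_scan_iff]
  simp [pvKeywords]
  tauto

-- ===== VERDICT (by name: the statement is the Claim_ definition above) =====
theorem get_query_suggestions_spec : Claim_equal_get_query_suggestions := by
  intro cq _
  unfold Spec_get_query_suggestions get_query_suggestions get_query_suggestions_alt
  simp only [PySem.Str.isIn_eq, PySem.Str.toList_lower, PySem.Str.len_eq,
    List.any_cons, List.any_nil, Bool.or_false, Bool.not_or,
    ← pvScanSet_def, List.nil_append]
  rw [show PySem.List.enumerate pvBlocks = [((0:Int), pvBlocks[0]), (1, pvBlocks[1]), (2, pvBlocks[2]), (3, pvBlocks[3])] from rfl]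
  simp only [List.foldl_cons, List.foldl_nil, cov0, cov1, cov2, cov3,
    Bool.not_or, Bool.and_assoc, List.nil_append, pvBlocks,
    List.getElem_cons_zero, List.getElem_cons_succ]
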